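-- pv_equiv track=rewrite | github.com/jackwoodman/pave | parkes_master.py | format_length
-- ===== SOURCE A (Python) =====
-- DEFAULTLEN = 16
--
-- def dsp_vowel_remover(word):
--     # This function removes vowels from words.
--     vowels, new_word, has_taken = ["a","e","i","o","u"], [], False
--
--     for x in list(word)[::-1]:
--          if (x not in vowels or has_taken):
--             new_word.append(x)
--          else:
--             has_taken = True
--
--     to_return_word = "".join(new_word[::-1])
--
--     return to_return_word, (to_return_word != word)
--
-- def format_length(input_string, length=DEFAULTLEN, remove_vowel=False, alignment="LEFT"):
--     # Formats string. Default len is 16, but can be changed. Won't remove vowels unless asked to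
--     output_string = ""
--
--     if len(str(input_string)) > length:
--         if not remove_vowel:
--             output_string = input_string[:length]
--
--         elif remove_vowel:
--             unfinished = True
--             new_string = input_string
--             while unfinished == True:
--                 result = dsp_vowel_remover(new_string)
--                 new_string, unfinished = result
--
--                 if len(new_string) <= length:
--                     unfinished = False
--
--             output_string = new_string
--
--             output_string = format_length(output_string, length)
--
--     elif len(input_string) < length:
--         # Haven't reached length, so extend per alignment rules
--         if alignment == "LEFT":
--             output_string = input_string
--             for i in range(length - len(input_string)):
--                 output_string += " "
--         else:
--             # attempt right alignment
--             output_string = input_string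
--             for i in range(length - len(input_string)):
--                 output_string = " " + output_string
--     else:
--         output_string = input_string
--
--     return output_string
-- ===== SOURCE B (Python) =====
-- DEFAULTLEN = 16
--
-- def format_length(input_string, length=DEFAULTLEN, remove_vowel=False, alignment="LEFT"):
--     # One right-to-left pass: strip at most len-length trailing-most vowels, then truncate/pad.
--     s = input_string
--     left = True
--     if len(s) > length:
--         if not remove_vowel:
--             return s[:length]
--         k = len(s) - length
--         kept = []
--         for ch in reversed(s):
--             if k > 0 and ch in "aeiou":
--                 k -= 1
--             else:
--                 kept.append(ch)
--         kept.reverse()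
--         s = "".join(kept)
--         if len(s) > length:
--             return s[:length]
--     else:
--         left = (alignment == "LEFT")
--     pad = " " * (length - len(s))
--     return s + pad if left else pad + s
-- ===== Notes on version B (the rewrite author's own statement) =====
-- stated objective: alternative
-- what changed: A repeatedly rescans the whole string (dsp_vowel_remover once per vowel removed, plus a recursive re-format and char-by-char padding loops); B strips exactly len(s)-length trailing-most vowels in a single right-to-left pass and pads with one string multiply.
import Mathlib
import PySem

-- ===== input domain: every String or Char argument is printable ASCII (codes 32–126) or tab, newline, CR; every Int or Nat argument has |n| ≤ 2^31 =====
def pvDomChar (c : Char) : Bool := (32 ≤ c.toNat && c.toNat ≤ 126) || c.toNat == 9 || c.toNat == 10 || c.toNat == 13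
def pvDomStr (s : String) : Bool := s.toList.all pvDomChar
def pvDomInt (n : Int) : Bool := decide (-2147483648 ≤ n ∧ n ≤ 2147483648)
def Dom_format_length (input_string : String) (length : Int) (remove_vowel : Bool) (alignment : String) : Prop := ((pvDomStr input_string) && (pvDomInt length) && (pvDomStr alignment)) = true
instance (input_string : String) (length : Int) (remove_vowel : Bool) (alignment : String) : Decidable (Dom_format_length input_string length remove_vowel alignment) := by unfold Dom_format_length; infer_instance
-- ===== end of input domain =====

-- ===== PORT A =====
-- B strips the needed trailing vowels in one right-to-left pass instead of A's repeated
-- full rescans; same return value everywhere (objective: alternative).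

-- A-side helpers
def pvVowelsA : List Char := ['a', 'e', 'i', 'o', 'u']

-- for x in list(word)[::-1]: if (x not in vowels or has_taken): new_word.append(x) else: has_taken = True
def pvDspFold (st : List Char × Bool) (x : Char) : List Char × Bool :=
  if !(pvVowelsA.contains x) || st.2 then (st.1 ++ [x], st.2) else (st.1, true)

def dsp_vowel_remover (word : String) : String × Bool :=
  let st := (word.toList.reverse).foldl pvDspFold ([], false)
  let to_return_word := String.ofList st.1.reverse    -- "".join(new_word[::-1])
  (to_return_word, to_return_word != word)

-- proof-side spec used only by pvALoop's termination proof (cited by name below)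
def pvHasV (ys : List Char) : Bool := ys.any (pvVowelsA.contains ·)

def pvRemFirst : List Char → List Char
  | [] => []
  | y :: t => if pvVowelsA.contains y then t else y :: pvRemFirst t

theorem pvHasV_cons (y : Char) (t : List Char) :
    pvHasV (y :: t) = (pvVowelsA.contains y || pvHasV t) := by
  simp [pvHasV]

theorem pvRemFirst_len (ys : List Char) (hv : pvHasV ys = true) :
    (pvRemFirst ys).length + 1 = ys.length := by
  induction ys with
  | nil => simp [pvHasV] at hv
  | cons y t ih =>
      rw [pvHasV_cons] at hv
      by_cases hy : y ∈ pvVowelsA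
      · simp [pvRemFirst, hy]
      · have hv' : pvHasV t = true := by
          simp at hv
          rcases hv with h | h
          · exact absurd h hy
          · exact h
        simp [pvRemFirst, hy, ih hv']

theorem pvRemFirst_id (ys : List Char) (hv : pvHasV ys = false) :
    pvRemFirst ys = ys := by
  induction ys with
  | nil => rfl
  | cons y t ih =>
      rw [pvHasV_cons] at hv
      simp at hv
      simp [pvRemFirst, hv.1, ih (by simpa using hv.2)]

theorem pvDspFold_true (zs a : List Char) :
    zs.foldl pvDspFold (a, true) = (a ++ zs, true) := by
  induction zs generalizing a with
  | nil => simp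
  | cons z u ih => simp [pvDspFold, ih]

theorem pvDspFold_false (ys acc : List Char) :
    ys.foldl pvDspFold (acc, false) = (acc ++ pvRemFirst ys, pvHasV ys) := by
  induction ys generalizing acc with
  | nil => simp [pvHasV, pvRemFirst]
  | cons y t ih =>
      rw [pvHasV_cons]
      by_cases hy : y ∈ pvVowelsA
      · simp [pvDspFold, hy, pvRemFirst, pvDspFold_true]
      · simp [pvDspFold, hy, pvRemFirst, ih]

theorem pvDsp_eq (w : String) :
    dsp_vowel_remover w =
      (String.ofList (pvRemFirst w.toList.reverse).reverse, pvHasV w.toList.reverse) := by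
  unfold dsp_vowel_remover
  rw [pvDspFold_false]
  by_cases hv : pvHasV w.toList.reverse = true
  · have hlen := pvRemFirst_len w.toList.reverse hv
    have hne : String.ofList (pvRemFirst w.toList.reverse).reverse ≠ w := by
      intro he
      have := congrArg (fun s => s.toList.length) he
      simp at this hlen
      omega
    simp [hv, hne]
  · have hid := pvRemFirst_id w.toList.reverse (by simpa using hv)
    have : String.ofList (pvRemFirst w.toList.reverse).reverse = w := by
      rw [hid]; simp
    simp [hv, this]

theorem pvDsp_len_lt (w : String) (h : (dsp_vowel_remover w).2 = true) :
    (dsp_vowel_remover w).1.toList.length < w.toList.length := by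
  rw [pvDsp_eq] at h ⊢
  have := pvRemFirst_len w.toList.reverse (by simpa using h)
  simp only [String.toList_ofList, List.length_reverse] at this ⊢
  omega

-- while unfinished == True: ...
def pvALoop (new_string : String) (length : Int) : String :=
  let result := dsp_vowel_remover new_string
  let ns := result.1
  let unfinished := result.2
  let unfinished := if (PySem.Str.len ns) ≤ length then false else unfinished
  if h : unfinished = true then pvALoop ns length else ns
termination_by new_string.toList.length
decreasing_by
  have h' : (if PySem.Str.len (dsp_vowel_remover new_string).1 ≤ length then false
      else (dsp_vowel_remover new_string).2) = true := h
  split at h'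
  · exact absurd h' (by simp)
  · exact pvDsp_len_lt new_string h' 

def format_length (input_string : String) (length : Int) (remove_vowel : Bool) (alignment : String) : String :=
  if (PySem.Str.len input_string) > length then
    if remove_vowel = false then
      PySem.Str.slice input_string none (some length)          -- input_string[:length]
    else
      let output_string := pvALoop input_string length
      format_length output_string length false "LEFT"          -- format_length(output_string, length)
  else if (PySem.Str.len input_string) < length then
    if alignment = "LEFT" then
      -- for i in range(length - len(input_string)): output_string += " "
      (PySem.List.pyRange 0 (length - PySem.Str.len input_string) 1).foldl
        (fun acc _ => String.ofList (acc.toList ++ [' '])) input_string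
    else
      -- for i in range(length - len(input_string)): output_string = " " + output_string
      (PySem.List.pyRange 0 (length - PySem.Str.len input_string) 1).foldl
        (fun acc _ => String.ofList (' ' :: acc.toList)) input_string
  else
    input_string
termination_by (if remove_vowel then 1 else 0)
decreasing_by simp_all

-- ===== PORT B =====
-- B-side helpers
-- ch in "aeiou"  (exact for a single character: membership of a 1-char string is List.contains)
def pvIsVowelB (ch : Char) : Bool := "aeiou".toList.contains ch

def pvStripFold (st : Int × List Char) (ch : Char) : Int × List Char :=
  if st.1 > 0 && pvIsVowelB ch then (st.1 - 1, st.2) else (st.1, st.2 ++ [ch])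

def format_length_alt (input_string : String) (length : Int) (remove_vowel : Bool) (alignment : String) : String :=
  let s := input_string
  if (PySem.Str.len s) > length then
    if remove_vowel = false then
      PySem.Str.slice s none (some length)                     -- return s[:length]
    else
      let k := PySem.Str.len s - length
      let kept := ((s.toList.reverse).foldl pvStripFold (k, [])).2
      let s' := String.ofList kept.reverse
      if (PySem.Str.len s') > length then
        PySem.Str.slice s' none (some length)                  -- return s[:length]
      else
        -- pad = " " * (length - len(s)); return s + pad   (left = True here)
        String.ofList (s'.toList ++ List.replicate (length - PySem.Str.len s').toNat ' ')
  else
    let left := alignment == "LEFT"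
    let pad := List.replicate (length - PySem.Str.len s).toNat ' '
    if left then String.ofList (s.toList ++ pad) else String.ofList (pad ++ s.toList)

-- ===== PRECONDITION & SPEC =====
def Spec_format_length (input_string : String) (length : Int) (remove_vowel : Bool) (alignment : String) (out : String) : Prop := out = format_length_alt input_string length remove_vowel alignment
instance (input_string : String) (length : Int) (remove_vowel : Bool) (alignment : String) (out : String) : Decidable (Spec_format_length input_string length remove_vowel alignment out) := by unfold Spec_format_length; infer_instance

-- ===== CLAIM (what is proved, stated in full; the proofs are below) =====
def Claim_equal_format_length : Prop := ∀ (input_string : String) (length : Int) (remove_vowel : Bool) (alignment : String), Dom_format_length input_string length remove_vowel alignment → Spec_format_length input_string length remove_vowel alignment (format_length input_string length remove_vowel alignment)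

-- ===== LEMMAS AND PROOFS =====

-- spec of B's one-pass strip
def pvG : List Char → Int → List Char
  | [], _ => []
  | y :: t, k => if 0 < k ∧ pvVowelsA.contains y then pvG t (k - 1) else y :: pvG t k

theorem pvIsVowelB_eq (y : Char) : pvIsVowelB y = pvVowelsA.contains y := by
  have h : "aeiou".toList = pvVowelsA := by decide
  rw [pvIsVowelB, h]

theorem pvStripFold_eq (ys : List Char) (k : Int) (acc : List Char) :
    (ys.foldl pvStripFold (k, acc)).2 = acc ++ pvG ys k := by
  induction ys generalizing k acc with
  | nil => simp [pvG]
  | cons y t ih =>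
      by_cases hk : 0 < k <;> by_cases hy : y ∈ pvVowelsA <;>
        simp [pvStripFold, pvIsVowelB_eq, pvG, hk, hy, ih]

theorem pvG_nonpos (ys : List Char) (k : Int) (hk : k ≤ 0) : pvG ys k = ys := by
  induction ys generalizing k with
  | nil => simp [pvG]
  | cons y t ih =>
      have h : ¬ 0 < k := by omega
      simp [pvG, h, ih k hk]

theorem pvG_no_vowel (ys : List Char) (k : Int) (hv : pvHasV ys = false) : pvG ys k = ys := by
  induction ys generalizing k with
  | nil => simp [pvG]
  | cons y t ih =>
      rw [pvHasV_cons] at hv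
      simp at hv
      simp [pvG, hv.1, ih k (by simpa using hv.2)]

theorem pvG_step (ys : List Char) (k : Int) (hv : pvHasV ys = true) (hk : 0 < k) :
    pvG ys k = pvG (pvRemFirst ys) (k - 1) := by
  induction ys generalizing k with
  | nil => simp [pvHasV] at hv
  | cons y t ih =>
      rw [pvHasV_cons] at hv
      by_cases hy : y ∈ pvVowelsA
      · simp [pvG, hk, hy, pvRemFirst]
      · have hv' : pvHasV t = true := by
          simp at hv
          rcases hv with h | h
          · exact absurd h hy
          · exact h
        have h1 : ¬ (0 < k - 1 ∧ y ∈ pvVowelsA) := by tauto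
        simp [pvG, hy, pvRemFirst]
        exact ih k hv' hk

-- the vowel-removal loop of A equals B's one-pass strip
theorem pvALoop_eq (s : String) (L : Int) (h : (PySem.Str.len s) > L) :
    pvALoop s L = String.ofList (pvG s.toList.reverse (PySem.Str.len s - L)).reverse := by
  rw [pvALoop]
  simp only [pvDsp_eq, PySem.Str.len_eq, String.toList_ofList, List.length_reverse]
  rw [PySem.Str.len_eq] at h
  by_cases hv : pvHasV s.toList.reverse = true
  · have hlen : (pvRemFirst s.toList.reverse).length + 1 = s.toList.length := by
      have := pvRemFirst_len s.toList.reverse hv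
      simpa using this
    have hk : 0 < (s.toList.length : Int) - L := by omega
    rw [pvG_step _ _ hv hk]
    by_cases hstop : ((pvRemFirst s.toList.reverse).length : Int) ≤ L
    · -- removed one vowel and reached the target: k - 1 = 0
      have hkk : (s.toList.length : Int) - L - 1 ≤ 0 := by omega
      rw [pvG_nonpos _ _ hkk, if_pos hstop]
      simp
    · rw [if_neg hstop]
      simp only [hv, dite_true]
      have hlt : PySem.Str.len (String.ofList (pvRemFirst s.toList.reverse).reverse) > L := by
        simp only [PySem.Str.len_eq, String.toList_ofList, List.length_reverse]
        omega
      rw [pvALoop_eq _ _ hlt]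
      simp only [PySem.Str.len_eq, String.toList_ofList, List.length_reverse, List.reverse_reverse]
      have harg : ((pvRemFirst s.toList.reverse).length : Int) - L
          = (s.toList.length : Int) - L - 1 := by omega
      rw [harg]
  · -- no vowels: the loop stops immediately with the string unchanged
    rw [pvG_no_vowel _ _ (by simpa using hv), pvRemFirst_id _ (by simpa using hv)]
    simp only [List.length_reverse]
    rw [if_neg (by omega : ¬ ((s.toList.length : Int) ≤ L))]
    simp [hv]
termination_by s.toList.length
decreasing_by
  have := pvRemFirst_len s.toList.reverse hv
  simp at this ⊢
  omega

-- A's padding loops in closed form (stated in simp-normal form)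
theorem pvPadLeft (l : List Int) (acc : String) :
    l.foldl (fun acc _ => String.ofList (acc.toList ++ [' '])) acc
      = String.ofList (acc.toList ++ List.replicate l.length ' ') := by
  induction l generalizing acc with
  | nil => simp
  | cons x t ih =>
      rw [List.foldl_cons, ih]
      apply congrArg
      simp [List.replicate_succ]

theorem pvPadRight (l : List Int) (acc : String) :
    l.foldl (fun acc _ => String.ofList (' ' :: acc.toList)) acc
      = String.ofList (List.replicate l.length ' ' ++ acc.toList) := by
  induction l generalizing acc with
  | nil => simp
  | cons x t ih =>
      rw [List.foldl_cons, ih]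
      apply congrArg
      simp [List.replicate_succ', List.append_assoc]

-- the rv = false case of A equals B's pad/truncate tail for any string
theorem pvPlain_eq (s : String) (L : Int) :
    format_length s L false "LEFT"
      = if (PySem.Str.len s) > L then PySem.Str.slice s none (some L)
        else String.ofList (s.toList ++ List.replicate (L - PySem.Str.len s).toNat ' ') := by
  rw [format_length]
  by_cases h : (PySem.Str.len s) > L
  · rw [if_pos h, if_pos h, if_pos rfl]
  · rw [if_neg h, if_neg h]
    by_cases h2 : (PySem.Str.len s) < L
    · rw [if_pos h2, if_pos rfl, pvPadLeft]
      apply congrArg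
      apply congrArg
      apply congrArg (fun n => List.replicate n ' ')
      simp [PySem.List.length_pyRange_one]
    · have hEq : PySem.Str.len s = L := by omega
      have hz : (L - PySem.Str.len s).toNat = 0 := by omega
      rw [if_neg h2, hz]
      simp

theorem format_length_eq_alt (input_string : String) (length : Int) (remove_vowel : Bool) (alignment : String) :
    format_length input_string length remove_vowel alignment
      = format_length_alt input_string length remove_vowel alignment := by
  by_cases h : (PySem.Str.len input_string) > length
  · by_cases hr : remove_vowel = false
    · rw [format_length, format_length_alt, if_pos h, if_pos h, hr, if_pos rfl, if_pos rfl]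
    · rw [format_length]
      rw [if_pos h, if_neg hr]
      rw [pvPlain_eq, pvALoop_eq _ _ h]
      rw [format_length_alt]
      rw [if_pos h, if_neg hr]
      simp only [pvStripFold_eq, List.nil_append]
  · rw [format_length, format_length_alt, if_neg h, if_neg h]
    by_cases h2 : (PySem.Str.len input_string) < length
    · rw [if_pos h2]
      by_cases ha : alignment = "LEFT"
      · have hb : (alignment == "LEFT") = true := by simpa using ha
        rw [if_pos ha, hb, if_pos rfl, pvPadLeft]
        apply congrArg
        apply congrArg
        apply congrArg (fun n => List.replicate n ' ')
        simp [PySem.List.length_pyRange_one]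
      · have hb : (alignment == "LEFT") = false := by simpa using ha
        rw [if_neg ha, hb, pvPadRight]
        simp only [Bool.false_eq_true, if_false]
        apply congrArg
        apply congrArg (fun l => l ++ input_string.toList)
        apply congrArg (fun n => List.replicate n ' ')
        simp [PySem.List.length_pyRange_one]
    · have hEq : PySem.Str.len input_string = length := by omega
      have hz : (length - PySem.Str.len input_string).toNat = 0 := by omega
      rw [if_neg h2, hz]
      by_cases hb : (alignment == "LEFT") = true <;> simp [hb]

-- ===== VERDICT (by name: the statement is the Claim_ definition above) =====
theorem format_length_spec : Claim_equal_format_length := by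
  intro input_string length remove_vowel alignment _
  unfold Spec_format_length
  exact format_length_eq_alt input_string length remove_vowel alignment
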